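-- pv_equiv track=rewrite | github.com/Bonorinoa/leanecon_v2 | src/prover/harness.py | _extract_theorem_name
-- ===== SOURCE A (Python) =====
-- def _extract_theorem_name(theorem_with_sorry: str) -> str:
--     for line in theorem_with_sorry.splitlines():
--         stripped = line.strip()
--         if stripped.startswith(("theorem ", "lemma ")):
--             parts = stripped.split()
--             if len(parts) >= 2:
--                 return parts[1]
--     return "anonymous_theorem"
-- ===== SOURCE B (Python) =====
-- import re
--
-- # One regex over the whole (newline-normalised) text instead of a line loop:
-- # '^' with re.MULTILINE finds the line starts, the literal space after the
-- # keyword reproduces A's startswith("theorem "/"lemma ") test, '[ \t]*' the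
-- # stripping, and the greedy '\S+' the token A returns as parts[1].
-- _THEOREM_RE = re.compile(r'^[ \t]*(?:theorem|lemma) [ \t]*(\S+)', re.MULTILINE)
--
--
-- def _extract_theorem_name(theorem_with_sorry: str) -> str:
--     text = theorem_with_sorry.replace('\r\n', '\n').replace('\r', '\n')
--     m = _THEOREM_RE.search(text)
--     return m.group(1) if m else "anonymous_theorem"
-- ===== Notes on version B (the rewrite author's own statement) =====
-- stated objective: idiomatic
-- what changed: Replaces A's explicit line loop (splitlines, strip, startswith, split, index) by one compiled regex searched once over the newline-normalised text with re.MULTILINE, delegating the scanning to the regex engine.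
import Mathlib
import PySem

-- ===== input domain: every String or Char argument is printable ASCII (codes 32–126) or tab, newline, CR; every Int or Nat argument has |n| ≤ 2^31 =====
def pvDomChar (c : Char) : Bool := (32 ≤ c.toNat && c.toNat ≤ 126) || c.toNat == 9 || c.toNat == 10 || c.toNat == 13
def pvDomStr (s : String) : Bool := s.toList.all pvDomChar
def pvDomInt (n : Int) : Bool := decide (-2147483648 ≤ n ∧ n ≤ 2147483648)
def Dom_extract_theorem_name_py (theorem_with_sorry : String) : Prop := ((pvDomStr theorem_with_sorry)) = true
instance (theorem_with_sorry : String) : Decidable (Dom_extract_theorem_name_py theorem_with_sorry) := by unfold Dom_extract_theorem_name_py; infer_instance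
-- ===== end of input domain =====

-- B replaces A's explicit line loop (splitlines/strip/startswith/split) by one regex
-- search r'^[ \t]*(?:theorem|lemma) [ \t]*(\S+)' with re.MULTILINE over the
-- newline-normalised text (idiomatic; same cost class).

-- ===== PORT A =====
def extract_theorem_name_py_go : List String → String
  | [] => "anonymous_theorem"
  | line :: rest =>
    let stripped := PySem.Str.strip line
    if PySem.Str.startswith stripped "theorem " || PySem.Str.startswith stripped "lemma " then
      let parts := PySem.Str.split₀ stripped
      if 2 ≤ parts.length then parts.getD 1 "" else extract_theorem_name_py_go rest
    else extract_theorem_name_py_go rest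

def extract_theorem_name_py (theorem_with_sorry : String) : String :=
  extract_theorem_name_py_go (PySem.Str.splitlines theorem_with_sorry)

-- ===== PORT B =====
-- the character class [ \t] of the pattern
def pvReBlank (c : Char) : Bool := c == ' ' || c == '\t'
-- \S (complement of Python's ASCII \s)
def pvReNonSpace (c : Char) : Bool :=
  !(c == ' ' || c == '\t' || c == '\n' || c == '\r' || c == '\x0b' || c == '\x0c')

-- One attempt of the pattern at the current position (hand port of the regex body;
-- exact: the greedy '[ \t]*' and '\S+' need no backtracking because the atom that
-- follows each of them rejects ' ' and '\t').
def pvReTry (cs : List Char) : Option (List Char) :=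
  match (if List.isPrefixOf "theorem ".toList (cs.dropWhile pvReBlank) then   -- ^[ \t]* then the keyword + ' '
           some ((cs.dropWhile pvReBlank).drop 8)
         else if List.isPrefixOf "lemma ".toList (cs.dropWhile pvReBlank) then
           some ((cs.dropWhile pvReBlank).drop 6)
         else none) with
  | none => none
  | some r =>                                                                  -- [ \t]*(\S+)
    if ((r.dropWhile pvReBlank).takeWhile pvReNonSpace).isEmpty then none
    else some ((r.dropWhile pvReBlank).takeWhile pvReNonSpace)

-- re.search with re.MULTILINE: try the pattern at each position left to right; the
-- '^' anchor restricts the attempts to position 0 and the positions after a '\n'.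
def pvReSearch : Bool → List Char → Option (List Char)
  | atLineStart, [] => if atLineStart then pvReTry [] else none
  | atLineStart, c :: rest =>
    match (if atLineStart then pvReTry (c :: rest) else none) with
    | some nm => some nm
    | none => pvReSearch (c == '\n') rest

def extract_theorem_name_py_alt (theorem_with_sorry : String) : String :=
  match pvReSearch true
      (PySem.Str.replace (PySem.Str.replace theorem_with_sorry "\r\n" "\n") "\r" "\n").toList with
  | some nm => String.ofList nm
  | none => "anonymous_theorem"

-- ===== PRECONDITION & SPEC =====
def Spec_extract_theorem_name_py (theorem_with_sorry : String) (out : String) : Prop := out = extract_theorem_name_py_alt theorem_with_sorry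
instance (theorem_with_sorry : String) (out : String) : Decidable (Spec_extract_theorem_name_py theorem_with_sorry out) := by unfold Spec_extract_theorem_name_py; infer_instance

-- ===== CLAIM (what is proved, stated in full; the proofs are below) =====
def Claim_equal_extract_theorem_name_py : Prop := ∀ (theorem_with_sorry : String), Dom_extract_theorem_name_py theorem_with_sorry → Spec_extract_theorem_name_py theorem_with_sorry (extract_theorem_name_py theorem_with_sorry)

-- ===== LEMMAS AND PROOFS =====

def pvIsBreak (c : Char) : Bool := c == '\r' || c == '\n'

theorem pvChar_eq_iff (c d : Char) : c = d ↔ c.toNat = d.toNat := by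
  constructor
  · rintro rfl; rfl
  · intro h
    exact Char.ext (UInt32.toNat_inj.mp (by simpa using h))

-- ===== the two .replace calls, characterised structurally =====

-- replace('\r\n', '\n')
def pvRep1 : List Char → List Char
  | [] => []
  | '\r' :: '\n' :: r => '\n' :: pvRep1 r
  | c :: r => c :: pvRep1 r

-- replace('\r', '\n') (a length-1 pattern is a map)
def pvMapCR (c : Char) : Char := if c == '\r' then '\n' else c

-- B's normalised text
def pvN (l : List Char) : List Char := (pvRep1 l).map pvMapCR

theorem pvRep1_cons (c : Char) (rest : List Char)
    (hne : ∀ (r' : List Char), c = '\x0d' → rest = '\n' :: r' → False) :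
    pvRep1 (c :: rest) = c :: pvRep1 rest := by
  rw [pvRep1.eq_def]
  split
  · rename_i heq; simp at heq
  · rename_i r' heq
    injection heq with h1 h2
    exact (hne r' h1 h2).elim
  · rename_i heq
    injection heq with h1 h2
    subst h1 h2
    rfl

theorem pvReplaceGo_rn (fuel : Nat) (l acc : List Char) (hlen : l.length ≤ fuel) :
    PySem.Chars.replace.go ['\r', '\n'] ['\n'] fuel l acc = acc.reverse ++ pvRep1 l := by
  induction fuel generalizing l acc with
  | zero =>
    have : l = [] := List.length_eq_zero_iff.mp (Nat.le_zero.mp hlen)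
    subst this
    simp [PySem.Chars.replace.go, pvRep1]
  | succ n ih =>
    rcases l with _ | ⟨c, t⟩
    · simp [PySem.Chars.replace.go, pvRep1]
    · rw [PySem.Chars.replace.go]
      by_cases hp : List.isPrefixOf ['\r', '\n'] (c :: t) = true
      · obtain ⟨r, hr⟩ := List.isPrefixOf_iff_prefix.mp hp
        rcases t with _ | ⟨d, t'⟩
        · simp at hr
        · have hc : c = '\r' ∧ d = '\n' := by
            refine ⟨?_, ?_⟩ <;> · injection hr with h1 h2; first | exact h1.symm | (injection h2 with h2a h2b; exact h2a.symm)
          obtain ⟨rfl, rfl⟩ := hc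
          rw [if_pos hp]
          have hdrop : List.drop (['\r', '\n'] : List Char).length ('\r' :: '\n' :: t') = t' := rfl
          rw [hdrop, ih t' _ (by simp at hlen ⊢; omega)]
          simp [pvRep1]
      · rw [if_neg hp]
        rw [ih t _ (by simp at hlen ⊢; omega)]
        have hne : ∀ (r' : List Char), c = '\x0d' → t = '\n' :: r' → False := by
          intro r' h1 h2
          subst h1 h2
          exact hp (List.isPrefixOf_iff_prefix.mpr ⟨r', rfl⟩)
        rw [pvRep1_cons c t hne]
        simp

theorem pvReplace_rn (l : List Char) :
    PySem.Chars.replace l "\r\n".toList "\n".toList = pvRep1 l := by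
  show PySem.Chars.replace l ['\r', '\n'] ['\n'] = pvRep1 l
  unfold PySem.Chars.replace
  rw [if_neg (by simp)]
  exact pvReplaceGo_rn l.length l [] le_rfl

theorem pvReplaceGo_r (fuel : Nat) (l acc : List Char) (hlen : l.length ≤ fuel) :
    PySem.Chars.replace.go ['\r'] ['\n'] fuel l acc = acc.reverse ++ l.map pvMapCR := by
  induction fuel generalizing l acc with
  | zero =>
    have : l = [] := List.length_eq_zero_iff.mp (Nat.le_zero.mp hlen)
    subst this
    simp [PySem.Chars.replace.go]
  | succ n ih =>
    rcases l with _ | ⟨c, t⟩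
    · simp [PySem.Chars.replace.go]
    · rw [PySem.Chars.replace.go]
      by_cases hp : List.isPrefixOf ['\r'] (c :: t) = true
      · have hc : c = '\r' := by
          obtain ⟨r, hr⟩ := List.isPrefixOf_iff_prefix.mp hp
          injection hr with h1 h2
          exact h1.symm
        subst hc
        rw [if_pos hp]
        have hdrop : List.drop (['\r'] : List Char).length ('\r' :: t) = t := rfl
        rw [hdrop, ih t _ (by simp at hlen ⊢; omega)]
        simp [pvMapCR]
      · have hc : ¬ c = '\r' := by
          intro hcon; subst hcon; exact hp (List.isPrefixOf_iff_prefix.mpr ⟨t, rfl⟩)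
        rw [if_neg hp, ih t _ (by simp at hlen ⊢; omega)]
        simp [pvMapCR, hc]

theorem pvReplace_r (l : List Char) :
    PySem.Chars.replace l "\r".toList "\n".toList = l.map pvMapCR := by
  show PySem.Chars.replace l ['\r'] ['\n'] = l.map pvMapCR
  unfold PySem.Chars.replace
  rw [if_neg (by simp)]
  exact pvReplaceGo_r l.length l [] le_rfl

-- ===== splitlines, characterised structurally (A side) =====

def pvMSplitLines : List Char → List Char → List (List Char)
  | cur, [] => if cur.isEmpty then [] else [cur.reverse]
  | cur, '\r' :: '\n' :: rest => cur.reverse :: pvMSplitLines [] rest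
  | cur, c :: rest => if pvIsBreak c then cur.reverse :: pvMSplitLines [] rest else pvMSplitLines (c :: cur) rest

theorem pvMSplitLines_cons (cur : List Char) (c : Char) (rest : List Char)
    (hne : ∀ (r' : List Char), c = '\x0d' → rest = '\n' :: r' → False) :
    pvMSplitLines cur (c :: rest) =
      if pvIsBreak c then cur.reverse :: pvMSplitLines [] rest else pvMSplitLines (c :: cur) rest := by
  rw [pvMSplitLines.eq_def]
  split
  · rename_i heq; simp at heq
  · rename_i rest' heq
    injection heq with h1 h2
    exact (hne rest' h1 h2).elim
  · rename_i heq
    injection heq with h1 h2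
    subst h1 h2
    rfl

theorem pvGoLines_eq (isB : Char → Bool) (hB : ∀ c, pvDomChar c = true → isB c = pvIsBreak c)
    (cur cs : List Char) :
    ∀ (acc : List (List Char)), (∀ c ∈ cs, pvDomChar c = true) →
      PySem.Chars.splitlines.go isB cs cur acc = acc.reverse ++ pvMSplitLines cur cs := by
  induction cur, cs using pvMSplitLines.induct with
  | case1 cur h =>
    intro acc _
    rw [PySem.Chars.splitlines.go.eq_def]
    simp [pvMSplitLines, h]
  | case2 cur h =>
    intro acc _
    rw [PySem.Chars.splitlines.go.eq_def]
    simp [pvMSplitLines, h]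
  | case3 cur rest ih =>
    intro acc hdom
    rw [PySem.Chars.splitlines.go.eq_def]
    simp only []
    rw [ih _ (fun c hc => hdom c (by simp [hc]))]
    simp [pvMSplitLines]
  | case4 cur c rest hne hbrk ih =>
    intro acc hdom
    have hB' : isB c = pvIsBreak c := hB c (hdom c (by simp))
    rw [PySem.Chars.splitlines.go.eq_def]
    split
    · rename_i heq; simp at heq
    · rename_i rest' heq
      injection heq with h1 h2
      exact (hne rest' h1 h2).elim
    · rename_i heq
      injection heq with h1 h2
      subst h1 h2
      rw [hB', if_pos hbrk, ih _ (fun d hd => hdom d (by simp [hd]))]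
      rw [pvMSplitLines_cons _ _ _ hne, if_pos hbrk]
      simp
  | case5 cur c rest hne hbrk ih =>
    intro acc hdom
    have hB' : isB c = pvIsBreak c := hB c (hdom c (by simp))
    rw [PySem.Chars.splitlines.go.eq_def]
    split
    · rename_i heq; simp at heq
    · rename_i rest' heq
      injection heq with h1 h2
      exact (hne rest' h1 h2).elim
    · rename_i heq
      injection heq with h1 h2
      subst h1 h2
      rw [hB', if_neg hbrk, ih _ (fun d hd => hdom d (by simp [hd]))]
      rw [pvMSplitLines_cons _ _ _ hne, if_neg hbrk]

theorem pvIsBlit_eq (c : Char) (h : pvDomChar c = true) :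
    (decide (c.toNat = 10) || decide (c.toNat = 13) || decide (c.toNat = 11) ||
     decide (c.toNat = 12) || decide (c.toNat = 28) || decide (c.toNat = 29) ||
     decide (c.toNat = 30) || decide (c.toNat = 133) || decide (c.toNat = 8232) ||
     decide (c.toNat = 8233)) = pvIsBreak c := by
  simp only [pvDomChar, Bool.or_eq_true, Bool.and_eq_true, beq_iff_eq, decide_eq_true_eq] at h
  rw [Bool.eq_iff_iff]
  simp only [pvIsBreak, Bool.or_eq_true, beq_iff_eq, decide_eq_true_eq, pvChar_eq_iff]
  show _ ↔ (c.toNat = '\r'.toNat ∨ c.toNat = '\n'.toNat)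
  simp only [show '\r'.toNat = 13 from rfl, show '\n'.toNat = 10 from rfl]
  omega

theorem pvSplitlines_eq (cs : List Char) (hdom : ∀ c ∈ cs, pvDomChar c = true) :
    PySem.Chars.splitlines cs = pvMSplitLines [] cs := by
  unfold PySem.Chars.splitlines
  exact pvGoLines_eq _ (fun c hc => pvIsBlit_eq c hc) [] cs [] hdom

-- ===== decomposition of the text into first line / break / rest =====

def pvScanLine : List Char → List Char × List Char
  | [] => ([], [])
  | c :: cs => if pvIsBreak c then ([], c :: cs) else
      let p := pvScanLine cs
      (c :: p.1, p.2)

def pvStripBreak : List Char → List Char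
  | '\r' :: '\n' :: r => r
  | _ :: r => r
  | [] => []

theorem pvScanLine_snd_length (l : List Char) : (pvScanLine l).2.length ≤ l.length := by
  induction l with
  | nil => simp [pvScanLine]
  | cons c cs ih =>
    simp only [pvScanLine]
    split
    · simp
    · simp only [List.length_cons]; omega

theorem pvStripBreak_length_lt (l : List Char) (h : l ≠ []) : (pvStripBreak l).length < l.length := by
  rcases l with _ | ⟨d, _ | ⟨e, r⟩⟩
  · simp at h
  · simp [pvStripBreak.eq_def]
  · simp only [pvStripBreak.eq_def]
    split
    · rename_i heq
      injection heq with h1 h2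
      injection h2 with h2a h2b
      subst h2b
      simp
    · rename_i heq
      injection heq with h1 h2
      subst h2
      simp
    · simp_all

theorem pvStripBreak_cons (c : Char) (rest : List Char)
    (hne : ∀ (r' : List Char), c = '\x0d' → rest = '\n' :: r' → False) :
    pvStripBreak (c :: rest) = rest := by
  rw [pvStripBreak.eq_def]
  split
  · rename_i heq
    injection heq with h1 h2
    exact (hne _ h1 h2).elim
  · rename_i heq
    injection heq with h1 h2
    subst h2
    rfl
  · rename_i heq; simp at heq

theorem pvScanLine_append (l : List Char) : (pvScanLine l).1 ++ (pvScanLine l).2 = l := by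
  induction l with
  | nil => rfl
  | cons c cs ih =>
    rw [pvScanLine]
    split
    · rfl
    · simpa using ih

theorem pvScanLine_fst_break (l : List Char) : ∀ c ∈ (pvScanLine l).1, pvIsBreak c = false := by
  induction l with
  | nil => intro c hc; simp [pvScanLine] at hc
  | cons c cs ih =>
    rw [pvScanLine]
    split
    · intro d hd; simp at hd
    · rename_i hbr
      intro d hd
      simp only [List.mem_cons] at hd
      rcases hd with rfl | hd
      · simpa using hbr
      · exact ih d hd

theorem pvScanLine_snd_head (l : List Char) (d : Char) (r : List Char)
    (h : (pvScanLine l).2 = d :: r) : pvIsBreak d = true := by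
  induction l with
  | nil => simp [pvScanLine] at h
  | cons c cs ih =>
    rw [pvScanLine] at h
    by_cases hbr : pvIsBreak c
    · rw [if_pos hbr] at h
      injection h with h1 h2
      subst h1
      exact hbr
    · rw [if_neg hbr] at h
      exact ih h

theorem pvStripBreak_subset (l : List Char) : ∀ c ∈ pvStripBreak l, c ∈ l := by
  rcases l with _ | ⟨d, _ | ⟨e, r⟩⟩
  · simp [pvStripBreak]
  · simp [pvStripBreak.eq_def]
  · intro c hc
    rw [pvStripBreak.eq_def] at hc
    revert hc
    split
    · rename_i heq
      injection heq with h1 h2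
      injection h2 with h2a h2b
      subst h2b
      intro hc; simp [hc]
    · rename_i heq
      injection heq with h1 h2
      subst h2
      intro hc; simp [hc]
    · rename_i heq; simp at heq

theorem pvMSplitLines_scan (cur cs : List Char) (h : ¬(cur = [] ∧ cs = [])) :
    pvMSplitLines cur cs =
      (cur.reverse ++ (pvScanLine cs).1) :: pvMSplitLines [] (pvStripBreak (pvScanLine cs).2) := by
  induction cur, cs using pvMSplitLines.induct with
  | case1 cur hc => simp at hc; subst hc; simp at h
  | case2 cur hc =>
    simp at hc
    simp [pvMSplitLines, pvScanLine, pvStripBreak, hc]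
  | case3 cur rest ih =>
    have hbrk : pvIsBreak '\r' = true := rfl
    rw [pvMSplitLines.eq_def]
    simp only []
    rw [pvScanLine.eq_def]
    simp only [if_pos hbrk]
    show _ = (cur.reverse ++ []) :: pvMSplitLines [] rest
    simp
  | case4 cur c rest hne hbrk ih =>
    rw [pvMSplitLines_cons _ _ _ hne, if_pos hbrk]
    rw [pvScanLine.eq_def]
    simp only [if_pos hbrk]
    rw [pvStripBreak_cons _ _ hne]
    simp
  | case5 cur c rest hne hbrk ih =>
    rw [pvMSplitLines_cons _ _ _ hne, if_neg hbrk]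
    rw [ih (by simp)]
    conv_rhs => rw [pvScanLine.eq_def]
    simp only [if_neg hbrk]
    simp

-- ===== normalisation interacts with the decomposition =====

theorem pvN_nil : pvN [] = [] := rfl

theorem pvRep1_append_of_no_cr (L r : List Char) (hL : ∀ c ∈ L, ¬ c = '\r') :
    pvRep1 (L ++ r) = L ++ pvRep1 r := by
  induction L with
  | nil => simp
  | cons c L ih =>
    have hc : ¬ c = '\r' := hL c (by simp)
    rw [List.cons_append, pvRep1_cons c (L ++ r) (fun r' h1 _ => hc h1)]
    rw [ih (fun d hd => hL d (by simp [hd]))]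
    simp

theorem pvMap_id_of (L : List Char) (h : ∀ c ∈ L, ¬ c = '\r') : List.map pvMapCR L = L := by
  induction L with
  | nil => rfl
  | cons c t ih => simp [pvMapCR, h c (by simp), ih (fun d hd => h d (by simp [hd]))]

theorem pvN_append_line (L r : List Char) (hL : ∀ c ∈ L, pvIsBreak c = false) :
    pvN (L ++ r) = L ++ pvN r := by
  have hcr : ∀ c ∈ L, ¬ c = '\r' := by
    intro c hc hcon
    subst hcon
    simpa [pvIsBreak] using hL _ hc
  unfold pvN
  rw [pvRep1_append_of_no_cr L r hcr, List.map_append, pvMap_id_of L hcr]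

theorem pvN_break (d : Char) (r : List Char) (hd : pvIsBreak d = true) :
    pvN (d :: r) = '\n' :: pvN (pvStripBreak (d :: r)) := by
  simp only [pvIsBreak, Bool.or_eq_true, beq_iff_eq] at hd
  rcases hd with rfl | rfl
  · rcases r with _ | ⟨e, r'⟩
    · rfl
    · by_cases he : e = '\n'
      · subst he
        simp [pvN, pvRep1, pvStripBreak, pvMapCR]
      · have hne : ∀ (r'' : List Char), ('\r' : Char) = '\x0d' → e :: r' = '\n' :: r'' → False := by
          intro r'' _ h2
          injection h2 with ha _
          exact he ha
        have h1 := pvRep1_cons '\r' (e :: r') hne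
        have h2 := pvStripBreak_cons '\r' (e :: r') hne
        simp [pvN, h1, h2, pvMapCR]
  · have hne : ∀ (r' : List Char), ('\n' : Char) = '\x0d' → r = '\n' :: r' → False := by
      intro r' hh _
      exact absurd hh (by decide)
    have h1 := pvRep1_cons '\n' r hne
    have h2 := pvStripBreak_cons '\n' r hne
    simp [pvN, h1, h2, pvMapCR]

-- ===== search: only line-start attempts matter =====

theorem pvReSearch_false_no_nl (w : List Char) (hw : ∀ c ∈ w, ¬ c = '\n') :
    pvReSearch false w = none := by
  induction w with
  | nil => rfl
  | cons c t ih =>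
    rw [pvReSearch]
    have hc : (c == '\n') = false := by simpa using hw c (by simp)
    rw [hc]
    exact ih (fun d hd => hw d (by simp [hd]))

theorem pvReSearch_false_through (w t : List Char) (hw : ∀ c ∈ w, ¬ c = '\n') :
    pvReSearch false (w ++ '\n' :: t) = pvReSearch true t := by
  induction w with
  | nil =>
    rw [List.nil_append, pvReSearch]
    simp
  | cons c w' ih =>
    rw [List.cons_append, pvReSearch]
    have hc : (c == '\n') = false := by simpa using hw c (by simp)
    rw [hc]
    exact ih (fun d hd => hw d (by simp [hd]))

theorem pvReSearch_line_last (L : List Char) (hL : ∀ c ∈ L, ¬ c = '\n') :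
    pvReSearch true L = pvReTry L := by
  rcases L with _ | ⟨c, t⟩
  · simp [pvReSearch]
  · rw [pvReSearch]
    rcases h : pvReTry (c :: t) with _ | nm
    · have hc : (c == '\n') = false := by simpa using hL c (by simp)
      rw [if_pos rfl]
      show pvReSearch (c == '\n') t = none
      rw [hc]
      exact pvReSearch_false_no_nl t (fun d hd => hL d (by simp [hd]))
    · rw [if_pos rfl]

theorem pvReSearch_line_step (L t : List Char) (hL : ∀ c ∈ L, ¬ c = '\n') :
    pvReSearch true (L ++ '\n' :: t) =
      match pvReTry (L ++ '\n' :: t) with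
      | some nm => some nm
      | none => pvReSearch true t := by
  rcases L with _ | ⟨c, L'⟩
  · rw [List.nil_append, pvReSearch]
    rcases h : pvReTry ('\n' :: t) with _ | nm <;> rw [if_pos rfl] <;> rfl
  · rw [List.cons_append, pvReSearch]
    rcases h : pvReTry (c :: (L' ++ '\n' :: t)) with _ | nm <;> rw [if_pos rfl]
    show pvReSearch (c == '\n') (L' ++ '\n' :: t) = pvReSearch true t
    have hc : (c == '\n') = false := by simpa using hL c (by simp)
    rw [hc]
    exact pvReSearch_false_through L' t (fun d hd => hL d (by simp [hd]))

-- a match never crosses the '\n' that ends the line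
theorem pvPrefix_stop {p D t : List Char} {x : Char} (hx : x ∉ p)
    (h : p <+: (D ++ x :: t)) : p <+: D := by
  induction p generalizing D with
  | nil => simp
  | cons a p' ih =>
    rcases D with _ | ⟨d, D'⟩
    · rw [List.nil_append, List.cons_prefix_cons] at h
      exact (hx (by simp [h.1])).elim
    · rw [List.cons_append, List.cons_prefix_cons] at h
      obtain ⟨rfl, h2⟩ := h
      exact (List.cons_prefix_cons).mpr ⟨rfl, ih (fun hm => hx (by simp [hm])) h2⟩

theorem pvDropWhile_stop (p : Char → Bool) (u t : List Char) (x : Char) (hx : p x = false) :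
    (u ++ x :: t).dropWhile p = u.dropWhile p ++ x :: t := by
  induction u with
  | nil => simp [List.dropWhile_cons, hx]
  | cons c u ih =>
    by_cases hc : p c <;> simp [List.dropWhile_cons, hc, ih]

theorem pvTakeWhile_stop (p : Char → Bool) (u t : List Char) (x : Char) (hx : p x = false) :
    (u ++ x :: t).takeWhile p = u.takeWhile p := by
  induction u with
  | nil => simp [List.takeWhile_cons, hx]
  | cons c u ih =>
    by_cases hc : p c <;> simp [List.takeWhile_cons, hc, ih]

theorem pvIsPrefixOf_stop (pat D t : List Char) (x : Char) (hx : x ∉ pat) :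
    List.isPrefixOf pat (D ++ x :: t) = List.isPrefixOf pat D := by
  rw [Bool.eq_iff_iff]
  simp only [List.isPrefixOf_iff_prefix]
  exact ⟨fun h => pvPrefix_stop hx h, fun h => h.trans (List.prefix_append _ _)⟩

theorem pvDrop_append_le (u t : List Char) (n : Nat) (hn : n ≤ u.length) :
    (u ++ t).drop n = u.drop n ++ t := by
  rw [List.drop_append_of_le_length hn]

theorem pvReTry_thm (cs : List Char)
    (h : List.isPrefixOf "theorem ".toList (cs.dropWhile pvReBlank) = true) :
    pvReTry cs =
      if ((((cs.dropWhile pvReBlank).drop 8).dropWhile pvReBlank).takeWhile pvReNonSpace).isEmpty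
      then none
      else some ((((cs.dropWhile pvReBlank).drop 8).dropWhile pvReBlank).takeWhile pvReNonSpace) := by
  unfold pvReTry
  rw [h, if_pos rfl]

theorem pvReTry_lem (cs : List Char)
    (h1 : List.isPrefixOf "theorem ".toList (cs.dropWhile pvReBlank) = false)
    (h2 : List.isPrefixOf "lemma ".toList (cs.dropWhile pvReBlank) = true) :
    pvReTry cs =
      if ((((cs.dropWhile pvReBlank).drop 6).dropWhile pvReBlank).takeWhile pvReNonSpace).isEmpty
      then none
      else some ((((cs.dropWhile pvReBlank).drop 6).dropWhile pvReBlank).takeWhile pvReNonSpace) := by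
  unfold pvReTry
  rw [h1, if_neg (by simp), h2, if_pos rfl]

theorem pvReTry_none (cs : List Char)
    (h1 : List.isPrefixOf "theorem ".toList (cs.dropWhile pvReBlank) = false)
    (h2 : List.isPrefixOf "lemma ".toList (cs.dropWhile pvReBlank) = false) :
    pvReTry cs = none := by
  unfold pvReTry
  rw [h1, if_neg (by simp), h2, if_neg (by simp)]

theorem pvReTry_stop (L t : List Char) :
    pvReTry (L ++ '\n' :: t) = pvReTry L := by
  have hD : (L ++ '\n' :: t).dropWhile pvReBlank = L.dropWhile pvReBlank ++ '\n' :: t :=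
    pvDropWhile_stop pvReBlank L t '\n' rfl
  have e1 : List.isPrefixOf "theorem ".toList ((L ++ '\n' :: t).dropWhile pvReBlank) =
      List.isPrefixOf "theorem ".toList (L.dropWhile pvReBlank) := by
    rw [hD, pvIsPrefixOf_stop "theorem ".toList _ t '\n' (by decide)]
  have e2 : List.isPrefixOf "lemma ".toList ((L ++ '\n' :: t).dropWhile pvReBlank) =
      List.isPrefixOf "lemma ".toList (L.dropWhile pvReBlank) := by
    rw [hD, pvIsPrefixOf_stop "lemma ".toList _ t '\n' (by decide)]
  by_cases hT : List.isPrefixOf "theorem ".toList (L.dropWhile pvReBlank) = true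
  · have hlen : 8 ≤ (L.dropWhile pvReBlank).length := by
      have := (List.isPrefixOf_iff_prefix.mp hT).length_le
      simpa using this
    rw [pvReTry_thm _ (by rw [e1]; exact hT), pvReTry_thm L hT]
    rw [hD, pvDrop_append_le _ _ 8 hlen, pvDropWhile_stop pvReBlank _ t '\n' rfl,
      pvTakeWhile_stop pvReNonSpace _ t '\n' rfl]
  · have hT' : List.isPrefixOf "theorem ".toList (L.dropWhile pvReBlank) = false :=
      Bool.eq_false_iff.mpr hT
    by_cases hLm : List.isPrefixOf "lemma ".toList (L.dropWhile pvReBlank) = true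
    · have hlen : 6 ≤ (L.dropWhile pvReBlank).length := by
        have := (List.isPrefixOf_iff_prefix.mp hLm).length_le
        simpa using this
      rw [pvReTry_lem _ (by rw [e1]; exact hT') (by rw [e2]; exact hLm), pvReTry_lem L hT' hLm]
      rw [hD, pvDrop_append_le _ _ 6 hlen, pvDropWhile_stop pvReBlank _ t '\n' rfl,
        pvTakeWhile_stop pvReNonSpace _ t '\n' rfl]
    · have hLm' : List.isPrefixOf "lemma ".toList (L.dropWhile pvReBlank) = false :=
        Bool.eq_false_iff.mpr hLm
      rw [pvReTry_none _ (by rw [e1]; exact hT') (by rw [e2]; exact hLm'), pvReTry_none L hT' hLm']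

-- ===== A's per-line pipeline (strip/startswith/split) characterised =====

def pvMSplit : List Char → List Char → List (List Char)
  | cur, [] => if cur.isEmpty then [] else [cur.reverse]
  | cur, c :: rest =>
    if PySem.Chars.isspace c then
      (if cur.isEmpty then pvMSplit [] rest else cur.reverse :: pvMSplit [] rest)
    else pvMSplit (c :: cur) rest

theorem pvGoSplit_eq (cur cs : List Char) :
    ∀ (acc : List (List Char)),
      PySem.Chars.split₀.go cs cur acc = acc.reverse ++ pvMSplit cur cs := by
  induction cur, cs using pvMSplit.induct with
  | case1 cur hc =>
    intro acc
    rw [PySem.Chars.split₀.go.eq_def]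
    simp [pvMSplit, hc]
  | case2 cur hc =>
    intro acc
    rw [PySem.Chars.split₀.go.eq_def]
    simp [pvMSplit, hc]
  | case3 cur c rest hsp hc ih =>
    intro acc
    rw [PySem.Chars.split₀.go.eq_def]
    simp only [hsp, hc, if_true]
    rw [ih]
    simp [pvMSplit, hsp, hc]
  | case4 cur c rest hsp hc ih =>
    intro acc
    rw [PySem.Chars.split₀.go.eq_def]
    simp only [hsp, if_true]
    rw [if_neg hc, ih]
    simp [pvMSplit, hsp, if_neg hc]
    simpa using hc
  | case5 cur c rest hsp ih =>
    intro acc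
    rw [PySem.Chars.split₀.go.eq_def]
    simp only [hsp, if_false, Bool.false_eq_true]
    rw [ih]
    simp [pvMSplit, hsp]

theorem pvMSplit_token (cur cs : List Char) (h : ¬cur.isEmpty) :
    pvMSplit cur cs =
      (cur.reverse ++ cs.takeWhile (fun c => !PySem.Chars.isspace c)) ::
        pvMSplit [] (cs.dropWhile (fun c => !PySem.Chars.isspace c)) := by
  induction cs generalizing cur with
  | nil => simp [pvMSplit, h]
  | cons c rest ih =>
    by_cases hsp : PySem.Chars.isspace c
    · simp [pvMSplit, hsp, h, List.takeWhile_cons, List.dropWhile_cons]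
    · simp only [pvMSplit, hsp, if_false, Bool.false_eq_true]
      rw [ih (c :: cur) (by simp)]
      simp [List.takeWhile_cons, List.dropWhile_cons, hsp]

theorem pvMSplit_nil_spaces (u t : List Char) (hu : ∀ c ∈ u, PySem.Chars.isspace c = true) :
    pvMSplit [] (u ++ t) = pvMSplit [] t := by
  induction u with
  | nil => rfl
  | cons c u ih =>
    have hc := hu c (by simp)
    simp only [List.cons_append, pvMSplit, hc, if_true, List.isEmpty_nil]
    exact ih (fun d hd => hu d (by simp [hd]))

theorem pvMSplit_spaces (u : List Char) (hu : ∀ c ∈ u, PySem.Chars.isspace c = true) :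
    ∀ cur, pvMSplit cur u = pvMSplit cur [] := by
  induction u with
  | nil => intro cur; rfl
  | cons c u ih =>
    intro cur
    have hc := hu c (by simp)
    have ih' := ih (fun d hd => hu d (by simp [hd]))
    by_cases hcur : cur.isEmpty
    · simp only [pvMSplit, hc, hcur, if_true]
      rw [ih' []]
      simp [pvMSplit, hcur]
    · simp only [pvMSplit, hc, hcur, if_true, if_false]
      rw [ih' []]
      simp [pvMSplit, hcur]

theorem pvMSplit_append_spaces (t u : List Char) (hu : ∀ c ∈ u, PySem.Chars.isspace c = true) :
    ∀ cur, pvMSplit cur (t ++ u) = pvMSplit cur t := by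
  induction t with
  | nil =>
    intro cur
    simpa using pvMSplit_spaces u hu cur
  | cons c t iht =>
    intro cur
    by_cases hsp : PySem.Chars.isspace c <;> by_cases hcur : cur.isEmpty <;>
      simp [pvMSplit, hsp, hcur, iht]

-- membership-wise congruence for takeWhile/dropWhile
theorem pvDropWhile_congr {p q : Char → Bool} (l : List Char) (h : ∀ c ∈ l, p c = q c) :
    l.dropWhile p = l.dropWhile q := by
  induction l with
  | nil => rfl
  | cons c cs ih =>
    have hc := h c (by simp)
    by_cases hp : p c
    · rw [List.dropWhile_cons_of_pos hp, List.dropWhile_cons_of_pos (hc ▸ hp)]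
      exact ih (fun d hd => h d (by simp [hd]))
    · rw [List.dropWhile_cons_of_neg hp, List.dropWhile_cons_of_neg (hc ▸ hp)]

theorem pvTakeWhile_congr {p q : Char → Bool} (l : List Char) (h : ∀ c ∈ l, p c = q c) :
    l.takeWhile p = l.takeWhile q := by
  induction l with
  | nil => rfl
  | cons c cs ih =>
    have hc := h c (by simp)
    by_cases hp : p c
    · rw [List.takeWhile_cons_of_pos hp, List.takeWhile_cons_of_pos (hc ▸ hp)]
      rw [ih (fun d hd => h d (by simp [hd]))]
    · rw [List.takeWhile_cons_of_neg hp, List.takeWhile_cons_of_neg (hc ▸ hp)]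

-- rstrip facts
theorem pvRstrip_eq_nil_iff (l : List Char) :
    PySem.Chars.rstrip l = [] ↔ ∀ c ∈ l, PySem.Chars.isspace c = true := by
  simp [PySem.Chars.rstrip, List.dropWhile_eq_nil_iff]

theorem pvRstrip_append (t r : List Char) (h : PySem.Chars.rstrip r ≠ []) :
    PySem.Chars.rstrip (t ++ r) = t ++ PySem.Chars.rstrip r := by
  unfold PySem.Chars.rstrip at *
  rw [List.reverse_append, List.dropWhile_append]
  have : ¬(List.dropWhile PySem.Chars.isspace r.reverse).isEmpty := by
    simpa [List.isEmpty_iff] using h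
  simp only [this, if_false, Bool.false_eq_true]
  simp

theorem pvRstrip_append_spaces (t u : List Char) (hu : ∀ c ∈ u, PySem.Chars.isspace c = true) :
    PySem.Chars.rstrip (t ++ u) = PySem.Chars.rstrip t := by
  unfold PySem.Chars.rstrip
  rw [List.reverse_append, List.dropWhile_append]
  have : (List.dropWhile PySem.Chars.isspace u.reverse) = [] :=
    List.dropWhile_eq_nil_iff.mpr (fun c hc => hu c (by simpa using hc))
  simp [this]

theorem pvRstrip_nonspace (w : List Char) (h : ∀ c ∈ w, PySem.Chars.isspace c = false) :
    PySem.Chars.rstrip w = w := by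
  unfold PySem.Chars.rstrip
  rw [List.dropWhile_eq_self_iff.mpr]
  · simp
  · intro hw
    simp only [Bool.not_eq_true]
    exact h _ (by simpa using List.head_mem hw)

theorem pvRstrip_prefix (l : List Char) : PySem.Chars.rstrip l <+: l := by
  unfold PySem.Chars.rstrip
  refine ⟨(l.reverse.takeWhile PySem.Chars.isspace).reverse, ?_⟩
  rw [← List.reverse_append, List.takeWhile_append_dropWhile]
  simp

theorem pvRstrip_decomp (l : List Char) :
    ∃ u, l = PySem.Chars.rstrip l ++ u ∧ ∀ c ∈ u, PySem.Chars.isspace c = true := by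
  refine ⟨(l.reverse.takeWhile PySem.Chars.isspace).reverse, ?_, ?_⟩
  · unfold PySem.Chars.rstrip
    rw [← List.reverse_append, List.takeWhile_append_dropWhile]
    simp
  · intro c hc
    rw [List.mem_reverse] at hc
    exact List.mem_takeWhile_imp hc

theorem pvMSplit_keyword (w r : List Char) (hw : w ≠ [])
    (hwns : ∀ c ∈ w, PySem.Chars.isspace c = false) :
    pvMSplit [] (w ++ ' ' :: r) = w :: pvMSplit [] r := by
  rcases w with _ | ⟨w0, w'⟩
  · simp at hw
  · have h0 : PySem.Chars.isspace w0 = false := hwns w0 (by simp)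
    have h' : ∀ c ∈ w', (fun c => !PySem.Chars.isspace c) c = true := by
      intro c hc; simp [hwns c (by simp [hc])]
    simp only [List.cons_append, pvMSplit, h0, Bool.false_eq_true, if_false, List.isEmpty_nil]
    rw [pvMSplit_token _ _ (by simp)]
    have hsp : PySem.Chars.isspace ' ' = true := by decide
    rw [List.takeWhile_append_of_pos h', List.dropWhile_append_of_pos h']
    rw [List.takeWhile_cons_of_neg (by simp [hsp]), List.dropWhile_cons_of_neg (by simp [hsp])]
    simp only [pvMSplit, hsp, if_true, List.isEmpty_nil]
    simp

theorem pvSplit_after_kw (w r : List Char) (hw : w ≠ [])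
    (hwns : ∀ c ∈ w, PySem.Chars.isspace c = false)
    (hr : r.dropWhile PySem.Chars.isspace ≠ []) :
    pvMSplit [] (PySem.Chars.rstrip ((w ++ [' ']) ++ r)) =
      w :: ((r.dropWhile PySem.Chars.isspace).takeWhile (fun c => !PySem.Chars.isspace c))
        :: pvMSplit [] ((r.dropWhile PySem.Chars.isspace).dropWhile (fun c => !PySem.Chars.isspace c)) := by
  have hrs : PySem.Chars.rstrip r ≠ [] := by
    intro h
    exact hr (List.dropWhile_eq_nil_iff.mpr (pvRstrip_eq_nil_iff r |>.mp h))
  rw [pvRstrip_append _ _ hrs]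
  obtain ⟨u, hu1, hu2⟩ := pvRstrip_decomp r
  have step1 : pvMSplit [] ((w ++ [' ']) ++ PySem.Chars.rstrip r) = w :: pvMSplit [] (PySem.Chars.rstrip r) := by
    simpa [List.append_assoc] using pvMSplit_keyword w (PySem.Chars.rstrip r) hw hwns
  rw [step1]
  have step2 : pvMSplit [] (PySem.Chars.rstrip r) = pvMSplit [] r := by
    conv_rhs => rw [hu1]
    exact (pvMSplit_append_spaces _ _ hu2 []).symm
  rw [step2]
  have step3 : pvMSplit [] r = pvMSplit [] (r.dropWhile PySem.Chars.isspace) := by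
    conv_lhs => rw [← List.takeWhile_append_dropWhile (p := PySem.Chars.isspace) (l := r)]
    exact pvMSplit_nil_spaces _ _ (fun c hc => List.mem_takeWhile_imp hc)
  rw [step3]
  rcases hd : r.dropWhile PySem.Chars.isspace with _ | ⟨d, d'⟩
  · exact absurd hd hr
  · have hdns : PySem.Chars.isspace d = false := by
      have := List.head_dropWhile_not PySem.Chars.isspace (l := r) (by rw [hd]; simp)
      simpa [hd] using this
    simp only [pvMSplit, hdns, Bool.false_eq_true, if_false, List.isEmpty_nil]
    rw [pvMSplit_token _ _ (by simp)]
    simp [List.takeWhile_cons, List.dropWhile_cons, hdns]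

-- domain char facts
theorem pvIsspace_eq_reBlank (c : Char) (hdom : pvDomChar c = true) (hbr : pvIsBreak c = false) :
    PySem.Chars.isspace c = pvReBlank c := by
  simp only [pvDomChar, Bool.or_eq_true, Bool.and_eq_true, beq_iff_eq, decide_eq_true_eq] at hdom
  simp only [pvIsBreak, Bool.or_eq_false_iff, beq_eq_false_iff_ne] at hbr
  rw [Bool.eq_iff_iff]
  simp only [PySem.Chars.isspace, pvReBlank, Bool.or_eq_true, Bool.and_eq_true, beq_iff_eq,
    decide_eq_true_eq, pvChar_eq_iff]
  have h13 : c.toNat ≠ 13 := fun h => hbr.1 ((pvChar_eq_iff _ _).mpr (by simpa using h))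
  have h10 : c.toNat ≠ 10 := fun h => hbr.2 ((pvChar_eq_iff _ _).mpr (by simpa using h))
  show _ ↔ (c.toNat = ' '.toNat ∨ c.toNat = '\t'.toNat)
  simp only [show ' '.toNat = 32 from rfl, show '\t'.toNat = 9 from rfl]
  omega

theorem pvNonspace_eq (c : Char) (hdom : pvDomChar c = true) (hbr : pvIsBreak c = false) :
    pvReNonSpace c = !PySem.Chars.isspace c := by
  simp only [pvDomChar, Bool.or_eq_true, Bool.and_eq_true, beq_iff_eq, decide_eq_true_eq] at hdom
  simp only [pvIsBreak, Bool.or_eq_false_iff, beq_eq_false_iff_ne, ne_eq] at hbr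
  have h13 : c.toNat ≠ 13 := fun h => hbr.1 ((pvChar_eq_iff _ _).mpr (by simpa using h))
  have h10 : c.toNat ≠ 10 := fun h => hbr.2 ((pvChar_eq_iff _ _).mpr (by simpa using h))
  rw [Bool.eq_iff_iff]
  simp only [pvReNonSpace, PySem.Chars.isspace, Bool.not_eq_true', Bool.not_eq_true,
    Bool.or_eq_false_iff, Bool.or_eq_true, Bool.and_eq_true, Bool.and_eq_false_iff,
    beq_eq_false_iff_ne, beq_iff_eq, decide_eq_true_eq, decide_eq_false_iff_not, ne_eq,
    pvChar_eq_iff]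
  simp only [show (' ' : Char).toNat = 32 from rfl, show ('\t' : Char).toNat = 9 from rfl,
    show ('\n' : Char).toNat = 10 from rfl, show ('\r' : Char).toNat = 13 from rfl,
    show ('\x0b' : Char).toNat = 11 from rfl, show ('\x0c' : Char).toNat = 12 from rfl]
  omega

-- A's verdict on one line
def pvALine (line : List Char) : Option (List Char) :=
  if PySem.Chars.startswith (PySem.Chars.strip line) "theorem ".toList
      || PySem.Chars.startswith (PySem.Chars.strip line) "lemma ".toList then
    if 2 ≤ (PySem.Chars.split₀ (PySem.Chars.strip line)).length then
      some ((PySem.Chars.split₀ (PySem.Chars.strip line)).getD 1 [])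
    else none
  else none

theorem pvSplit₀_eq (s : List Char) : PySem.Chars.split₀ s = pvMSplit [] s := by
  unfold PySem.Chars.split₀
  rw [pvGoSplit_eq]
  rfl

theorem pvA_kw_pos (L w r : List Char) (hw : w ≠ [])
    (hwns : ∀ c ∈ w, PySem.Chars.isspace c = false)
    (hr : (w ++ [' ']) ++ r = L) (hd : r.dropWhile PySem.Chars.isspace ≠ []) :
    PySem.Chars.startswith (PySem.Chars.rstrip L) (w ++ [' ']) = true ∧
    2 ≤ (PySem.Chars.split₀ (PySem.Chars.rstrip L)).length ∧
    (PySem.Chars.split₀ (PySem.Chars.rstrip L)).getD 1 [] =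
      (r.dropWhile PySem.Chars.isspace).takeWhile (fun c => !PySem.Chars.isspace c) := by
  have hrs : PySem.Chars.rstrip r ≠ [] := by
    intro h
    exact hd (List.dropWhile_eq_nil_iff.mpr (pvRstrip_eq_nil_iff r |>.mp h))
  have hsplit := pvSplit_after_kw w r hw hwns hd
  refine ⟨?_, ?_, ?_⟩
  · rw [← hr, pvRstrip_append _ _ hrs]
    exact List.isPrefixOf_iff_prefix.mpr (List.prefix_append _ _)
  · rw [← hr, pvSplit₀_eq, hsplit]
    simp
  · rw [← hr, pvSplit₀_eq, hsplit]
    rfl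

theorem pvA_kw_neg (L w r : List Char)
    (hwns : ∀ c ∈ w, PySem.Chars.isspace c = false)
    (hr : (w ++ [' ']) ++ r = L) (hd : r.dropWhile PySem.Chars.isspace = []) :
    PySem.Chars.rstrip L = w := by
  have hall : ∀ c ∈ r, PySem.Chars.isspace c = true := List.dropWhile_eq_nil_iff.mp hd
  rw [← hr, List.append_assoc]
  rw [pvRstrip_append_spaces _ _ (by
    intro c hc
    rcases List.mem_append.mp hc with h | h
    · simp at h; subst h; decide
    · exact hall c h)]
  exact pvRstrip_nonspace w hwns

theorem pvTheoremNonspace : ∀ c ∈ "theorem".toList, PySem.Chars.isspace c = false := by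
  intro c hc
  simp at hc
  rcases hc with rfl|rfl|rfl|rfl|rfl|(rfl|rfl) <;> rfl

theorem pvLemmaNonspace : ∀ c ∈ "lemma".toList, PySem.Chars.isspace c = false := by
  intro c hc
  simp at hc
  rcases hc with rfl|rfl|rfl|(rfl|rfl) <;> rfl

-- the crux: on a break-free ASCII line, A's strip/startswith/split pipeline and
-- the single regex attempt give the same verdict
theorem pvLine_branch (line L r : List Char) (kw : List Char)
    (hkweq : kw = "theorem".toList ∨ kw = "lemma".toList)
    (hkwns : ∀ c ∈ kw, PySem.Chars.isspace c = false)
    (hsp_eq : ∀ c ∈ line, PySem.Chars.isspace c = pvReBlank c)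
    (hnse : ∀ c ∈ line, pvReNonSpace c = !PySem.Chars.isspace c)
    (hmemL : ∀ c ∈ L, c ∈ line)
    (hr' : (kw ++ [' ']) ++ r = L)
    (hB : pvReTry line =
      if ((r.dropWhile pvReBlank).takeWhile pvReNonSpace).isEmpty then none
      else some ((r.dropWhile pvReBlank).takeWhile pvReNonSpace)) :
    (if PySem.Chars.startswith (PySem.Chars.rstrip L) "theorem ".toList
        || PySem.Chars.startswith (PySem.Chars.rstrip L) "lemma ".toList then
      if 2 ≤ (PySem.Chars.split₀ (PySem.Chars.rstrip L)).length then
        some ((PySem.Chars.split₀ (PySem.Chars.rstrip L)).getD 1 [])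
      else none
    else none) = pvReTry line := by
  have hkwne : kw ≠ [] := by rcases hkweq with rfl | rfl <;> decide
  have hmemr : ∀ c ∈ r, c ∈ L := by
    intro c hc; rw [← hr']; simp [hc]
  have hskipr : r.dropWhile pvReBlank = r.dropWhile PySem.Chars.isspace :=
    pvDropWhile_congr r (fun c hc => (hsp_eq c (hmemL c (hmemr c hc))).symm)
  rw [hskipr] at hB
  have htn : (r.dropWhile PySem.Chars.isspace).takeWhile pvReNonSpace =
      (r.dropWhile PySem.Chars.isspace).takeWhile (fun c => !PySem.Chars.isspace c) := by
    refine pvTakeWhile_congr _ (fun c hc => ?_)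
    exact hnse c (hmemL c (hmemr c ((List.dropWhile_sublist _).subset hc)))
  rw [htn] at hB
  rw [hB]
  by_cases hd : r.dropWhile PySem.Chars.isspace = []
  · rw [pvA_kw_neg L kw r hkwns hr' hd]
    have hs1 : PySem.Chars.startswith kw "theorem ".toList = false := by
      rcases hkweq with rfl | rfl <;> decide
    have hs2 : PySem.Chars.startswith kw "lemma ".toList = false := by
      rcases hkweq with rfl | rfl <;> decide
    rw [hs1, hs2]
    simp [hd]
  · obtain ⟨hsw, hlen, hgd⟩ := pvA_kw_pos L kw r hkwne hkwns hr' hd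
    have hcond : (PySem.Chars.startswith (PySem.Chars.rstrip L) "theorem ".toList
        || PySem.Chars.startswith (PySem.Chars.rstrip L) "lemma ".toList) = true := by
      rcases hkweq with rfl | rfl
      · rw [show ("theorem".toList ++ [' '] : List Char) = "theorem ".toList from rfl] at hsw
        rw [hsw]
        rfl
      · rw [show ("lemma".toList ++ [' '] : List Char) = "lemma ".toList from rfl] at hsw
        rw [hsw]
        simp
    rw [hcond, if_pos rfl, if_pos hlen, hgd]
    rcases he : r.dropWhile PySem.Chars.isspace with _ | ⟨dch, d'⟩
    · exact absurd he hd
    · have hdns : PySem.Chars.isspace dch = false := by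
        have := List.head_dropWhile_not PySem.Chars.isspace (l := r) (by rw [he]; simp)
        simpa [he] using this
      rw [List.takeWhile_cons_of_pos (by simp [hdns])]
      simp

theorem pvLine_eq (line : List Char)
    (hdom : ∀ c ∈ line, pvDomChar c = true) (hbr : ∀ c ∈ line, pvIsBreak c = false) :
    pvALine line = pvReTry line := by
  have hsp_eq : ∀ c ∈ line, PySem.Chars.isspace c = pvReBlank c := fun c hc =>
    pvIsspace_eq_reBlank c (hdom c hc) (hbr c hc)
  have hnse : ∀ c ∈ line, pvReNonSpace c = !PySem.Chars.isspace c := fun c hc =>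
    pvNonspace_eq c (hdom c hc) (hbr c hc)
  have hskip : line.dropWhile pvReBlank = line.dropWhile PySem.Chars.isspace :=
    pvDropWhile_congr line (fun c hc => (hsp_eq c hc).symm)
  set L := line.dropWhile PySem.Chars.isspace with hLdef
  have hmemL : ∀ c ∈ L, c ∈ line := fun c hc => (List.dropWhile_sublist _).subset hc
  have hstrip : PySem.Chars.strip line = PySem.Chars.rstrip L := rfl
  have hpre : PySem.Chars.rstrip L <+: L := pvRstrip_prefix L
  unfold pvALine
  rw [hstrip]
  by_cases hT : List.isPrefixOf "theorem ".toList L = true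
  · obtain ⟨r, hr⟩ := List.isPrefixOf_iff_prefix.mp hT
    have hdropr : L.drop 8 = r := by rw [← hr]; exact List.drop_left' (by rfl)
    have hr' : ("theorem".toList ++ [' ']) ++ r = L := hr
    have hB := pvReTry_thm line (by rw [hskip]; exact hT)
    rw [hskip, hdropr] at hB
    exact pvLine_branch line L r "theorem".toList (Or.inl rfl) pvTheoremNonspace
      hsp_eq hnse hmemL hr' hB
  · by_cases hLm : List.isPrefixOf "lemma ".toList L = true
    · obtain ⟨r, hr⟩ := List.isPrefixOf_iff_prefix.mp hLm
      have hdropr : L.drop 6 = r := by rw [← hr]; exact List.drop_left' (by rfl)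
      have hr' : ("lemma".toList ++ [' ']) ++ r = L := hr
      have hB := pvReTry_lem line (by rw [hskip]; exact Bool.eq_false_iff.mpr hT)
        (by rw [hskip]; exact hLm)
      rw [hskip, hdropr] at hB
      exact pvLine_branch line L r "lemma".toList (Or.inr rfl) pvLemmaNonspace
        hsp_eq hnse hmemL hr' hB
    · have hA1 : PySem.Chars.startswith (PySem.Chars.rstrip L) "theorem ".toList = false := by
        rw [Bool.eq_false_iff]
        intro hcon
        exact hT (List.isPrefixOf_iff_prefix.mpr
          ((List.isPrefixOf_iff_prefix.mp hcon).trans hpre))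
      have hA2 : PySem.Chars.startswith (PySem.Chars.rstrip L) "lemma ".toList = false := by
        rw [Bool.eq_false_iff]
        intro hcon
        exact hLm (List.isPrefixOf_iff_prefix.mpr
          ((List.isPrefixOf_iff_prefix.mp hcon).trans hpre))
      rw [hA1, hA2]
      rw [pvReTry_none line (by rw [hskip]; exact Bool.eq_false_iff.mpr hT)
        (by rw [hskip]; exact Bool.eq_false_iff.mpr hLm)]
      simp

-- ===== assembling both sides over the line list =====

def pvAFirst : List (List Char) → Option (List Char)
  | [] => none
  | l :: ls => match pvALine l with
    | some nm => some nm
    | none => pvAFirst ls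

theorem pvAgo (lines : List (List Char)) :
    extract_theorem_name_py_go (lines.map String.ofList) =
      match pvAFirst lines with
      | some nm => String.ofList nm
      | none => "anonymous_theorem" := by
  induction lines with
  | nil => rfl
  | cons l ls ih =>
    rw [List.map_cons, extract_theorem_name_py_go, pvAFirst]
    rcases hA : pvALine l with _ | nm
    · unfold pvALine at hA
      split_ifs at hA with h1 h2
      · have hc1 : (PySem.Str.startswith (PySem.Str.strip (String.ofList l)) "theorem " ||
            PySem.Str.startswith (PySem.Str.strip (String.ofList l)) "lemma ") = true := by
          simpa [PySem.Str.startswith, PySem.Str.strip] using h1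
        have hc2 : ¬ 2 ≤ (PySem.Str.split₀ (PySem.Str.strip (String.ofList l))).length := by
          simpa [PySem.Str.split₀, PySem.Str.strip] using h2
        rw [if_pos hc1, if_neg hc2]
        exact ih
      · have hc1 : ¬ ((PySem.Str.startswith (PySem.Str.strip (String.ofList l)) "theorem " ||
            PySem.Str.startswith (PySem.Str.strip (String.ofList l)) "lemma ") = true) := by
          intro hcon
          exact h1 (by simpa [PySem.Str.startswith, PySem.Str.strip] using hcon)
        rw [if_neg hc1]
        exact ih
    · unfold pvALine at hA
      split_ifs at hA with h1 h2
      · have hc1 : (PySem.Str.startswith (PySem.Str.strip (String.ofList l)) "theorem " ||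
            PySem.Str.startswith (PySem.Str.strip (String.ofList l)) "lemma ") = true := by
          simpa [PySem.Str.startswith, PySem.Str.strip] using h1
        have hc2 : 2 ≤ (PySem.Str.split₀ (PySem.Str.strip (String.ofList l))).length := by
          simpa [PySem.Str.split₀, PySem.Str.strip] using h2
        rw [if_pos hc1, if_pos hc2]
        have hnm : (PySem.Chars.split₀ (PySem.Chars.strip l)).getD 1 [] = nm := by
          simpa using hA
        have h1lt : 1 < (PySem.Chars.split₀ (PySem.Chars.strip l)).length := by omega
        rw [show PySem.Str.split₀ (PySem.Str.strip (String.ofList l)) =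
            List.map String.ofList (PySem.Chars.split₀ (PySem.Chars.strip l)) from by
          simp [PySem.Str.split₀, PySem.Str.strip]]
        rw [List.getD_eq_getElem _ _ (by simpa using h1lt), List.getElem_map]
        rw [← List.getD_eq_getElem _ _ h1lt, hnm]

theorem pvNoNl_of_break_free (L : List Char) (hL : ∀ c ∈ L, pvIsBreak c = false) :
    ∀ c ∈ L, ¬ c = '\n' := by
  intro c hc hcon
  subst hcon
  simpa [pvIsBreak] using hL _ hc

theorem pvMain : ∀ (n : Nat) (cs : List Char), cs.length ≤ n →
    (∀ c ∈ cs, pvDomChar c = true) →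
    pvReSearch true (pvN cs) = pvAFirst (pvMSplitLines [] cs) := by
  intro n
  induction n with
  | zero =>
    intro cs hlen _
    have : cs = [] := List.length_eq_zero_iff.mp (Nat.le_zero.mp hlen)
    subst this
    rfl
  | succ n ih =>
    intro cs hlen hdom
    rcases cs with _ | ⟨c, cs'⟩
    · rfl
    · have hsplit := pvMSplitLines_scan [] (c :: cs') (by simp)
      set L := (pvScanLine (c :: cs')).1 with hLdef
      set s2 := (pvScanLine (c :: cs')).2 with hs2def
      have happ := pvScanLine_append (c :: cs')
      have hbrL : ∀ d ∈ L, pvIsBreak d = false := pvScanLine_fst_break (c :: cs')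
      have hnl : ∀ d ∈ L, ¬ d = '\n' := pvNoNl_of_break_free L hbrL
      have hmem_line : ∀ d ∈ L, d ∈ c :: cs' := fun d hd => by
        rw [← happ]; exact List.mem_append.mpr (Or.inl hd)
      have hdom_line : ∀ d ∈ L, pvDomChar d = true := fun d hd => hdom d (hmem_line d hd)
      have hNsplit : pvN (c :: cs') = L ++ pvN s2 := by
        rw [← happ]
        exact pvN_append_line L s2 hbrL
      have hline : pvALine L = pvReTry L := pvLine_eq L hdom_line hbrL
      rw [List.reverse_nil, List.nil_append] at hsplit
      rw [hsplit, hNsplit, pvAFirst]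
      rcases hs2 : s2 with _ | ⟨d, r⟩
      · rw [pvN_nil, List.append_nil]
        rw [pvReSearch_line_last L hnl, ← hline]
        rcases hAL : pvALine L with _ | nm <;> rfl
      · have hds : (pvScanLine (c :: cs')).2 = d :: r := by rw [← hs2def, hs2]
        have hd : pvIsBreak d = true := pvScanLine_snd_head (c :: cs') d r hds
        rw [pvN_break d r hd, pvReSearch_line_step L _ hnl, pvReTry_stop, ← hline]
        have hrest : pvReSearch true (pvN (pvStripBreak (d :: r))) =
            pvAFirst (pvMSplitLines [] (pvStripBreak (d :: r))) := by
          apply ih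
          · have h1 : (d :: r).length ≤ cs'.length + 1 := by
              have := pvScanLine_snd_length (c :: cs')
              rw [hds] at this
              simpa using this
            have h2 : (pvStripBreak (d :: r)).length < (d :: r).length :=
              pvStripBreak_length_lt _ (by simp)
            simp only [List.length_cons] at hlen h1 h2 ⊢
            omega
          · intro x hx
            apply hdom
            rw [← happ, hds]
            refine List.mem_append.mpr (Or.inr ?_)
            exact pvStripBreak_subset _ x hx
        rw [hrest]

theorem extract_theorem_name_py_spec : Claim_equal_extract_theorem_name_py := by
  intro s hdom
  unfold Spec_extract_theorem_name_py extract_theorem_name_py extract_theorem_name_py_alt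
  have hdc : ∀ c ∈ s.toList, pvDomChar c = true := fun c hc => List.all_eq_true.mp hdom c hc
  have hA : PySem.Str.splitlines s = List.map String.ofList (PySem.Chars.splitlines s.toList) := by
    simp [PySem.Str.splitlines]
  have hB : (PySem.Str.replace (PySem.Str.replace s "\r\n" "\n") "\r" "\n").toList = pvN s.toList := by
    simp only [PySem.Str.toList_replace]
    rw [pvReplace_rn, pvReplace_r]
    rfl
  rw [hA, pvAgo, hB, pvMain s.toList.length s.toList le_rfl hdc,
    pvSplitlines_eq s.toList hdc]
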